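-- pv_equiv track=rewrite | github.com/wyh-neophyte/Metaheuristic-Algorithms-For-JSP-and-FJSP-Problems | methods/PSO.py | critical_path_exchange
-- ===== SOURCE A (Python) =====
-- import copy
--
-- def critical_path_exchange(particle, critical_path):
--     mark_list = [0] * len(particle)
--     particle_for_exchange = copy.deepcopy(particle)
--     block_num = 1
--     # 标记关键路径中的任务
--     for j, process in critical_path:
--         count = 0
--         for k in range(len(particle_for_exchange)):
--             if particle_for_exchange[k] == j:
--                 if count == process:
--                     mark_list[k] = block_num
--                     block_num += 1
--                 count += 1
--     return mark_list
-- ===== SOURCE B (Python) =====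
-- def critical_path_exchange(particle, critical_path):
--     counts = {}
--     for j in particle:
--         counts[j] = counts.get(j, 0) + 1
--     target = {}
--     block_num = 1
--     for j, process in critical_path:
--         if 0 <= process < counts.get(j, 0):
--             target[(j, process)] = block_num
--             block_num += 1
--     occ = {}
--     out = []
--     for j in particle:
--         c = occ.get(j, 0)
--         out.append(target.get((j, c), 0))
--         occ[j] = c + 1
--     return out
-- ===== Notes on version B (the rewrite author's own statement) =====
-- stated objective: faster
-- what changed: Replaces the per-entry rescan of the whole particle by a precomputed occurrence counter, a single walk of critical_path building a (job, occurrence) -> block dict, and one pass over the particle with running per-job occurrence indices; the unused deepcopy is dropped.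
import Mathlib
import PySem

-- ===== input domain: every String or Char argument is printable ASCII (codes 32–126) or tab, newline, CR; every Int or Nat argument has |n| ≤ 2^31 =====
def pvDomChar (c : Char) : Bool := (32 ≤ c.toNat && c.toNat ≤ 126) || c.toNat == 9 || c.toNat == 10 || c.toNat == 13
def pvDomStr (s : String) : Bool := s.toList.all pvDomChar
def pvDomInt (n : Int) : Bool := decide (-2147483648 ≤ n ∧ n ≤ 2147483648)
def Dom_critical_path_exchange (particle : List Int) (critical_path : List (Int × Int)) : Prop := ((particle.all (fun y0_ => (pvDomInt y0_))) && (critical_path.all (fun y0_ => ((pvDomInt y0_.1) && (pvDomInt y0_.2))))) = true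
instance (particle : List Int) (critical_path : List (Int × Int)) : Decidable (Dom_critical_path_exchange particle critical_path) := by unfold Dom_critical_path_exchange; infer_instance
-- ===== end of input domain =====

-- B replaces A's per-entry rescan of the particle by a counter, one dict built from
-- critical_path, and a single marking pass (O(|cp|+|particle|) work instead of a full
-- rescan per entry); return value only — A mutates nothing observable, its deepcopy is unused.

-- ===== PORT A =====
-- inner 'for k in range(len(...))' loop, walking particle and mark_list in lockstep
-- with the same state (count, block_num); returns the new mark_list and block_num.
def pvInnerA : List Int → List Int → Int → Int → Int → Int → List Int × Int
  | x :: xs, m :: ms, j, p, count, bn =>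
    if x = j then
      if count = p then
        let r := pvInnerA xs ms j p (count + 1) (bn + 1)
        (bn :: r.1, r.2)
      else
        let r := pvInnerA xs ms j p (count + 1) bn
        (m :: r.1, r.2)
    else
      let r := pvInnerA xs ms j p count bn
      (m :: r.1, r.2)
  | _, ms, _, _, _, bn => (ms, bn)  -- unreachable: the two lists have equal length

-- outer 'for j, process in critical_path' loop
def pvOuterA : List (Int × Int) → List Int → List Int → Int → List Int
  | [], _, mark, _ => mark
  | (j, p) :: cp, particle, mark, bn =>
    let r := pvInnerA particle mark j p 0 bn
    pvOuterA cp particle r.1 r.2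

def critical_path_exchange (particle : List Int) (critical_path : List (Int × Int)) : List Int :=
  pvOuterA critical_path particle (List.replicate particle.length 0) 1

-- ===== PORT B =====
-- counts[j] = counts.get(j, 0) + 1 loop
def pvCounts (xs : List Int) : PySem.Dict Int Int :=
  xs.foldl (fun d x => d.insert x (d.getD x 0 + 1)) PySem.Dict.empty

-- target[(j, process)] = block_num loop
def pvTarget : List (Int × Int) → PySem.Dict Int Int → PySem.Dict (Int × Int) Int → Int → PySem.Dict (Int × Int) Int
  | [], _, t, _ => t
  | (j, p) :: cp, counts, t, bn =>
    if 0 ≤ p ∧ p < counts.getD j 0 then pvTarget cp counts (t.insert (j, p) bn) (bn + 1)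
    else pvTarget cp counts t bn

-- final pass with running per-job occurrence dict
def pvMarkPass : List Int → PySem.Dict Int Int → PySem.Dict (Int × Int) Int → List Int
  | [], _, _ => []
  | x :: xs, occ, t =>
    let c := occ.getD x 0
    t.getD (x, c) 0 :: pvMarkPass xs (occ.insert x (c + 1)) t

def critical_path_exchange_alt (particle : List Int) (critical_path : List (Int × Int)) : List Int :=
  pvMarkPass particle PySem.Dict.empty (pvTarget critical_path (pvCounts particle) PySem.Dict.empty 1)

-- ===== PRECONDITION & SPEC =====
def Spec_critical_path_exchange (particle : List Int) (critical_path : List (Int × Int)) (out : List Int) : Prop := out = critical_path_exchange_alt particle critical_path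
instance (particle : List Int) (critical_path : List (Int × Int)) (out : List Int) : Decidable (Spec_critical_path_exchange particle critical_path out) := by unfold Spec_critical_path_exchange; infer_instance

-- ===== CLAIM (what is proved, stated in full; the proofs are below) =====
def Claim_equal_critical_path_exchange : Prop := ∀ (particle : List Int) (critical_path : List (Int × Int)), Dom_critical_path_exchange particle critical_path → Spec_critical_path_exchange particle critical_path (critical_path_exchange particle critical_path)

-- ===== LEMMAS AND PROOFS =====

-- pointwise marking: element x at its (cnt x)-th occurrence gets value f (x, cnt x)
def markF : List Int → (Int → Int) → (Int × Int → Int) → List Int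
  | [], _, _ => []
  | x :: xs, cnt, f => f (x, cnt x) :: markF xs (fun y => if y = x then cnt x + 1 else cnt y) f

-- functional overlay of critical_path entries on a base function
def tgtF : List (Int × Int) → (Int → Int) → (Int × Int → Int) → Int → (Int × Int → Int) × Int
  | [], _, f, bn => (f, bn)
  | (j, p) :: cp, cnts, f, bn =>
    if 0 ≤ p ∧ p < cnts j then tgtF cp cnts (fun pr => if pr = (j, p) then bn else f pr) (bn + 1)
    else tgtF cp cnts f bn

theorem markF_congr (xs : List Int) : ∀ (cnt : Int → Int) (f g : Int × Int → Int),
    (∀ x i, cnt x ≤ i → f (x, i) = g (x, i)) → markF xs cnt f = markF xs cnt g := by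
  induction xs with
  | nil => intro cnt f g h; rfl
  | cons x xs ih =>
    intro cnt f g h
    simp only [markF]
    refine congrArg₂ _ (h x (cnt x) le_rfl) (ih _ f g ?_)
    intro y i hy
    apply h y i
    by_cases hyx : y = x <;> simp [hyx] at hy ⊢ <;> omega

theorem markF_zero (xs : List Int) : ∀ cnt, markF xs cnt (fun _ => 0) = List.replicate xs.length 0 := by
  induction xs with
  | nil => intro _; rfl
  | cons x xs ih => intro cnt; simp [markF, ih, List.replicate]

theorem inner_eq (xs : List Int) : ∀ (cnt : Int → Int) (f : Int × Int → Int) (j p bn : Int),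
    pvInnerA xs (markF xs cnt f) j p (cnt j) bn =
      (if cnt j ≤ p ∧ p < cnt j + (xs.count j : Int)
       then (markF xs cnt (fun pr => if pr = (j, p) then bn else f pr), bn + 1)
       else (markF xs cnt f, bn)) := by
  induction xs with
  | nil =>
    intro cnt f j p bn
    simp only [markF, pvInnerA, List.count_nil]
    rw [if_neg (by omega)]
  | cons x xs ih =>
    intro cnt f j p bn
    simp only [markF, pvInnerA]
    by_cases hx : x = j
    · subst hx
      by_cases hc : cnt x = p
      · rw [if_pos rfl, if_pos hc]
        have hrec := ih (fun y => if y = x then cnt x + 1 else cnt y) f x p (bn + 1)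
        simp only [if_true] at hrec
        rw [hrec, if_neg (by omega)]
        have hcount : ((x :: xs).count x : Int) = (xs.count x : Int) + 1 := by
          simp
        rw [if_pos (by rw [hcount]; constructor <;> omega)]
        rw [show ((if ((x : Int), cnt x) = (x, p) then bn else f (x, cnt x)) = bn) by simp [hc]]
        rw [markF_congr xs _ f (fun pr => if pr = (x, p) then bn else f pr) ?_]
        intro y i hy
        symm
        rw [ite_eq_right_iff]
        intro hpair
        rw [Prod.mk.injEq] at hpair
        obtain ⟨h1, h2⟩ := hpair
        subst h1
        simp at hy
        omega
      · rw [if_pos rfl, if_neg hc]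
        have hrec := ih (fun y => if y = x then cnt x + 1 else cnt y) f x p bn
        simp only [if_true] at hrec
        rw [hrec]
        have hcount : ((x :: xs).count x : Int) = (xs.count x : Int) + 1 := by
          simp
        by_cases hcond : cnt x + 1 ≤ p ∧ p < cnt x + 1 + (xs.count x : Int)
        · rw [if_pos hcond, if_pos (by rw [hcount]; omega)]
          rw [show ((if ((x : Int), cnt x) = (x, p) then bn else f (x, cnt x)) = f (x, cnt x)) by simp [hc]]
        · rw [if_neg hcond, if_neg (by rw [hcount]; omega)]
    · rw [if_neg hx]
      have hjx : ¬ j = x := fun h => hx h.symm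
      have hrec := ih (fun y => if y = x then cnt x + 1 else cnt y) f j p bn
      simp only [if_neg hjx] at hrec
      rw [hrec]
      have hcount : ((x :: xs).count j : Int) = (xs.count j : Int) := by
        simp [hx]
      by_cases hcond : cnt j ≤ p ∧ p < cnt j + (xs.count j : Int)
      · rw [if_pos hcond, if_pos (by rw [hcount]; exact hcond)]
        rw [show ((if ((x : Int), cnt x) = (j, p) then bn else f (x, cnt x)) = f (x, cnt x)) by simp [hx]]
      · rw [if_neg hcond, if_neg (by rw [hcount]; exact hcond)]

theorem outer_eq (cp : List (Int × Int)) : ∀ (particle : List Int) (f : Int × Int → Int) (bn : Int),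
    pvOuterA cp particle (markF particle (fun _ => 0) f) bn =
      markF particle (fun _ => 0) (tgtF cp (fun j => (particle.count j : Int)) f bn).1 := by
  induction cp with
  | nil => intro particle f bn; rfl
  | cons e cp ih =>
    obtain ⟨j, p⟩ := e
    intro particle f bn
    simp only [pvOuterA, tgtF]
    have h0 : (0 : Int) = (fun _ : Int => (0 : Int)) j := rfl
    rw [show pvInnerA particle (markF particle (fun _ => 0) f) j p 0 bn
          = pvInnerA particle (markF particle (fun _ => 0) f) j p ((fun _ : Int => (0:Int)) j) bn from rfl,
        inner_eq particle (fun _ => 0) f j p bn]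
    by_cases hcond : (0 : Int) ≤ p ∧ p < 0 + (particle.count j : Int)
    · rw [if_pos hcond, if_pos (by omega)]
      exact ih particle _ (bn + 1)
    · rw [if_neg hcond, if_neg (by omega)]
      exact ih particle f bn

theorem target_eq (cp : List (Int × Int)) :
    ∀ (cnts : PySem.Dict Int Int) (t : PySem.Dict (Int × Int) Int) (bn : Int),
    (fun pr => (pvTarget cp cnts t bn).getD pr 0) =
      (tgtF cp (fun j => cnts.getD j 0) (fun pr => t.getD pr 0) bn).1 := by
  induction cp with
  | nil => intro cnts t bn; rfl
  | cons e cp ih =>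
    obtain ⟨j, p⟩ := e
    intro cnts t bn
    simp only [pvTarget, tgtF]
    by_cases hcond : (0 : Int) ≤ p ∧ p < cnts.getD j 0
    · rw [if_pos hcond, if_pos hcond, ih]
      have hfun : (fun pr => (t.insert (j, p) bn).getD pr 0) =
          (fun pr => if pr = (j, p) then bn else t.getD pr 0) := by
        funext pr; rw [PySem.Dict.getD_insert]
      rw [hfun]
    · rw [if_neg hcond, if_neg hcond, ih]

theorem markPass_eq (xs : List Int) : ∀ (occ : PySem.Dict Int Int) (t : PySem.Dict (Int × Int) Int),
    pvMarkPass xs occ t = markF xs (fun y => occ.getD y 0) (fun pr => t.getD pr 0) := by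
  induction xs with
  | nil => intro occ t; rfl
  | cons x xs ih =>
    intro occ t
    simp only [pvMarkPass, markF, ih]
    have hfun : (fun y => (occ.insert x (occ.getD x 0 + 1)).getD y 0) =
        (fun y => if y = x then occ.getD x 0 + 1 else occ.getD y 0) := by
      funext y; rw [PySem.Dict.getD_insert]
    rw [hfun]

-- ===== VERDICT (by name: the statement is the Claim_ definition above) =====
theorem critical_path_exchange_spec : Claim_equal_critical_path_exchange := by
  intro particle cp _
  unfold Spec_critical_path_exchange critical_path_exchange critical_path_exchange_alt
  rw [markPass_eq]
  have hocc : (fun y => (PySem.Dict.empty : PySem.Dict Int Int).getD y 0) = (fun _ : Int => (0 : Int)) := by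
    funext y; rfl
  rw [hocc, target_eq]
  have hcnts : (fun j => (pvCounts particle).getD j 0) = (fun j => (particle.count j : Int)) := by
    funext j
    rw [show pvCounts particle = PySem.Dict.counter particle from
          PySem.Dict.foldl_insert_getD_add_one_eq_counter particle,
        PySem.Dict.getD_counter]
  have hempty : (fun pr => (PySem.Dict.empty : PySem.Dict (Int × Int) Int).getD pr 0) =
      (fun _ : Int × Int => (0 : Int)) := by funext pr; rfl
  rw [hcnts, hempty, ← outer_eq, markF_zero]
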